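-- pv_equiv track=rewrite | github.com/openpitkit/pit | scripts/generate_api_c.py | collect_braced
-- ===== SOURCE A (Python) =====
-- def collect_braced(
--     lines: list[str], start: int, open_char: str, close_char: str
-- ) -> tuple[str, int]:
--     parts = []
--     depth = 0
--     i = start
--     while i < len(lines):
--         line = lines[i].rstrip()
--         parts.append(line)
--         depth += line.count(open_char) - line.count(close_char)
--         i += 1
--         if depth <= 0:
--             break
--     return "\n".join(parts), i
-- ===== SOURCE B (Python) =====
-- def collect_braced(
--     lines: list[str], start: int, open_char: str, close_char: str
-- ) -> tuple[str, int]: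
--     subs = [ln.rstrip() for ln in lines[start:]]
--     depths = []
--     total = 0
--     for ln in subs:
--         total += ln.count(open_char) - ln.count(close_char)
--         depths.append(total)
--     p = next((k for k, d in enumerate(depths) if d <= 0), len(subs) - 1)
--     return "\n".join(subs[: p + 1]), start + p + 1
-- ===== Notes on version B (the rewrite author's own statement) =====
-- stated objective: alternative
-- what changed: Instead of A's running scan that appends, accumulates depth and breaks, B slices off the rstripped suffix lines[start:], builds a cumulative brace-depth table in one pass, locates the first index where the cumulative depth is <= 0 (defaulting to the last index), and slices and joins that prefix.
-- outside the precondition, e.g. on collect_braced(['{'], -1, '{', '}'): A returns ('{\n{', 1), B returns ('{', 0)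
import Mathlib
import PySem

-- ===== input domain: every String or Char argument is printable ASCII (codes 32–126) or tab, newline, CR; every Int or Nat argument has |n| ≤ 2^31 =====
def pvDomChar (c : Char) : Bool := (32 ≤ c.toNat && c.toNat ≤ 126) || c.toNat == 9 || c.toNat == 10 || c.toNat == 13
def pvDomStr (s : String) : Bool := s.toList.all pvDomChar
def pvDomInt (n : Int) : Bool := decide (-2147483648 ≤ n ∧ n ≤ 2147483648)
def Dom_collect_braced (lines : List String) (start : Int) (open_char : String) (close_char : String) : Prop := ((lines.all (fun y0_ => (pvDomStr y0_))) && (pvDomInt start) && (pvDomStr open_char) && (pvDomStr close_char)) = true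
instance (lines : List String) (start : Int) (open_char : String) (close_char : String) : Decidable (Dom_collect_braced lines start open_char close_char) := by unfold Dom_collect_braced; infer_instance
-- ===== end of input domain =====

-- B replaces A's running scan-with-break by a cumulative brace-depth table over the rstripped
-- suffix plus a first-crossing search; alternative decomposition, same asymptotic cost.


-- ===== PORT A =====
-- A's while loop: append rstripped line, accumulate depth, advance, break when depth ≤ 0.
def collectA_go (lines : List String) (oc cc : String) (parts : List String) (depth i : Int) : List String × Int :=
  if h : i < (lines.length : Int) then
    let line := PySem.Str.rstrip ((PySem.List.pyGet? lines i).getD "")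
    let parts2 := parts ++ [line]
    let depth2 := depth + (PySem.Str.count line oc : Int) - (PySem.Str.count line cc : Int)
    if depth2 ≤ 0 then (parts2, i + 1) else collectA_go lines oc cc parts2 depth2 (i + 1)
  else (parts, i)
termination_by ((lines.length : Int) - i).toNat
decreasing_by omega

def collect_braced (lines : List String) (start : Int) (open_char : String) (close_char : String) : String × Int :=
  let r := collectA_go lines open_char close_char [] 0 start
  (PySem.Str.join "\n" r.1, r.2)

-- ===== PORT B =====
def collectB_delta (oc cc s : String) : Int :=
  (PySem.Str.count s oc : Int) - (PySem.Str.count s cc : Int)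

def collect_braced_alt (lines : List String) (start : Int) (open_char : String) (close_char : String) : String × Int :=
  let subs := (PySem.List.slice lines (some start) none).map PySem.Str.rstrip
  let depths := (subs.foldl (fun (acc : List Int × Int) ln =>
      (acc.1 ++ [acc.2 + collectB_delta open_char close_char ln],
       acc.2 + collectB_delta open_char close_char ln)) ([], 0)).1
  let p : Int :=
    match (PySem.List.enumerate depths 0).find? (fun kd => decide (kd.2 ≤ 0)) with
    | some kd => kd.1
    | none => (subs.length : Int) - 1
  (PySem.Str.join "\n" (PySem.List.slice subs none (some (p + 1))), start + p + 1)

-- ===== PRECONDITION & SPEC =====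
-- Pre_ restricts to the natural domain of nonnegative start indices: for start < -len(lines)
-- Python A raises IndexError, and for -len(lines) ≤ start < 0 A's value comes from negative-index
-- wraparound that can rescan the list from the beginning — an accident of A's indexing that B's
-- suffix-slice does not reproduce.
def Pre_collect_braced (lines : List String) (start : Int) (open_char : String) (close_char : String) : Prop :=
  0 ≤ start
instance (lines : List String) (start : Int) (open_char : String) (close_char : String) : Decidable (Pre_collect_braced lines start open_char close_char) := by unfold Pre_collect_braced; infer_instance

def pvWitness_collect_braced : List String × Int × String × String :=
  (["int f(void) {", "  return 0;  ", "}"], 0, "{", "}")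

def Spec_collect_braced (lines : List String) (start : Int) (open_char : String) (close_char : String) (out : String × Int) : Prop := out = collect_braced_alt lines start open_char close_char
instance (lines : List String) (start : Int) (open_char : String) (close_char : String) (out : String × Int) : Decidable (Spec_collect_braced lines start open_char close_char out) := by unfold Spec_collect_braced; infer_instance

-- ===== CLAIM (what is proved, stated in full; the proofs are below) =====
def Claim_equal_collect_braced : Prop := ∀ (lines : List String) (start : Int) (open_char : String) (close_char : String), Dom_collect_braced lines start open_char close_char → Pre_collect_braced lines start open_char close_char → Spec_collect_braced lines start open_char close_char (collect_braced lines start open_char close_char)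

-- ===== LEMMAS AND PROOFS =====

-- Shared reference loop over the already-rstripped suffix: returns the kept prefix and its length.
def cbSpecLoop (oc cc : String) : List String → Int → List String × Nat
  | [], _ => ([], 0)
  | r :: rest, d =>
    let d' := d + collectB_delta oc cc r
    if d' ≤ 0 then ([r], 1)
    else
      let q := cbSpecLoop oc cc rest d'
      (r :: q.1, q.2 + 1)

-- Cumulative depths of B's table, as a structural recursion.
def cbPresums (oc cc : String) (t : Int) : List String → List Int
  | [] => []
  | r :: rest => (t + collectB_delta oc cc r) :: cbPresums oc cc (t + collectB_delta oc cc r) rest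

theorem cbA_eq_spec (lines : List String) (oc cc : String) :
    ∀ (su : List String) (i : Int) (parts : List String) (d : Int), 0 ≤ i →
      lines.drop i.toNat = su →
      collectA_go lines oc cc parts d i =
        (parts ++ (cbSpecLoop oc cc (su.map PySem.Str.rstrip) d).1,
         i + ((cbSpecLoop oc cc (su.map PySem.Str.rstrip) d).2 : Int)) := by
  intro su
  induction su with
  | nil =>
    intro i parts d hi hd
    have hlen : lines.length ≤ i.toNat := by
      have := congrArg List.length hd
      simp only [List.length_drop, List.length_nil] at this
      omega
    rw [collectA_go, dif_neg (by omega)]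
    simp [cbSpecLoop]
  | cons x rest ih =>
    intro i parts d hi hd
    have hlt : i.toNat < lines.length := by
      by_contra hc
      rw [List.drop_eq_nil_of_le (by omega)] at hd
      exact absurd hd (by simp)
    have hget : PySem.List.pyGet? lines i = some x := by
      rw [← Int.toNat_of_nonneg hi, PySem.List.pyGet?_natCast]
      have h0 := congrArg (fun l => l[0]?) hd
      simpa [List.getElem?_drop] using h0
    have hdrop : lines.drop (i + 1).toNat = rest := by
      have h1 : (i + 1).toNat = i.toNat + 1 := by omega
      rw [h1, ← List.tail_drop, hd, List.tail_cons]
    rw [collectA_go, dif_pos (by exact_mod_cast (by omega : (i : Int) < (lines.length : Int)))]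
    simp only [hget, Option.getD_some]
    have hds : d + (PySem.Str.count (PySem.Str.rstrip x) oc : Int)
        - (PySem.Str.count (PySem.Str.rstrip x) cc : Int)
        = d + collectB_delta oc cc (PySem.Str.rstrip x) := by
      simp only [collectB_delta]; ring
    rw [hds]
    simp only [List.map_cons, cbSpecLoop]
    by_cases hdep : d + collectB_delta oc cc (PySem.Str.rstrip x) ≤ 0
    · rw [if_pos hdep, if_pos hdep]
      simp
    · rw [if_neg hdep, if_neg hdep]
      rw [ih (i + 1) (parts ++ [PySem.Str.rstrip x]) (d + collectB_delta oc cc (PySem.Str.rstrip x)) (by omega) hdrop]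
      refine Prod.ext ?_ ?_
      · simp
      · simp only
        push_cast
        ring

theorem cbFoldl_eq_presums (oc cc : String) :
    ∀ (rs : List String) (xs : List Int) (t : Int),
      (rs.foldl (fun (acc : List Int × Int) ln =>
        (acc.1 ++ [acc.2 + collectB_delta oc cc ln], acc.2 + collectB_delta oc cc ln)) (xs, t)).1
      = xs ++ cbPresums oc cc t rs := by
  intro rs
  induction rs with
  | nil => intro xs t; simp [cbPresums]
  | cons r rest ih => intro xs t; simp only [List.foldl_cons, cbPresums, ih, List.append_assoc, List.cons_append, List.nil_append]

theorem cbFind_eq_spec (oc cc : String) :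
    ∀ (rs : List String) (d : Int) (s : Int),
      (((PySem.List.enumerate (cbPresums oc cc d rs) s).find? (fun kd => decide (kd.2 ≤ 0))).elim
        (s + (rs.length : Int) - 1) (fun kd => kd.1)) + 1
      = s + ((cbSpecLoop oc cc rs d).2 : Int) := by
  intro rs
  induction rs with
  | nil => intro d s; simp [cbPresums, cbSpecLoop]
  | cons r rest ih =>
    intro d s
    simp only [cbPresums, PySem.List.enumerate_cons, cbSpecLoop]
    by_cases h : d + collectB_delta oc cc r ≤ 0
    · have hd : (decide (d + collectB_delta oc cc r ≤ 0)) = true := by simpa using h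
      simp only [List.find?_cons, hd]
      simp [h]
    · have hd : (decide (d + collectB_delta oc cc r ≤ 0)) = false := by simpa using h
      simp only [List.find?_cons, hd, if_neg h]
      have := ih (d + collectB_delta oc cc r) (s + 1)
      rcases hf : (PySem.List.enumerate (cbPresums oc cc (d + collectB_delta oc cc r) rest) (s + 1)).find? (fun kd => decide (kd.2 ≤ 0)) with _ | kd
      · rw [hf] at this ⊢
        simp only [Option.elim, List.length_cons] at this ⊢
        push_cast at this ⊢
        omega
      · rw [hf] at this ⊢
        simp only [Option.elim] at this ⊢
        push_cast at this ⊢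
        omega

theorem cbTake_spec (oc cc : String) :
    ∀ (rs : List String) (d : Int), rs.take (cbSpecLoop oc cc rs d).2 = (cbSpecLoop oc cc rs d).1 := by
  intro rs
  induction rs with
  | nil => intro d; simp [cbSpecLoop]
  | cons r rest ih =>
    intro d
    simp only [cbSpecLoop]
    split_ifs with h
    · rfl
    · simp [List.take_succ_cons, ih]

-- ===== VERDICT (by name: the statement is the Claim_ definition above) =====
theorem collect_braced_spec : Claim_equal_collect_braced := by
  intro lines start oc cc _hdom hpre
  have hpre' : (0 : Int) ≤ start := hpre
  unfold Spec_collect_braced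
  simp only [collect_braced, collect_braced_alt]
  rw [PySem.List.slice_from lines hpre', cbFoldl_eq_presums oc cc, List.nil_append,
    cbA_eq_spec lines oc cc (lines.drop start.toNat) start [] 0 hpre' rfl, List.nil_append]
  have G := cbFind_eq_spec oc cc (List.map PySem.Str.rstrip (lines.drop start.toNat)) 0 0
  split
  next kd hf =>
    rw [hf] at G
    simp only [Option.elim] at G
    have h1 : kd.1 + 1
        = ((cbSpecLoop oc cc (List.map PySem.Str.rstrip (lines.drop start.toNat)) 0).2 : Int) := by
      omega
    refine Prod.ext ?_ ?_
    · simp only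
      rw [h1, PySem.List.slice_to_natCast, cbTake_spec]
    · simp only
      omega
  next hf =>
    rw [hf] at G
    simp only [Option.elim] at G
    have h1 : (↑(List.map PySem.Str.rstrip (lines.drop start.toNat)).length : Int) - 1 + 1
        = ((cbSpecLoop oc cc (List.map PySem.Str.rstrip (lines.drop start.toNat)) 0).2 : Int) := by
      omega
    refine Prod.ext ?_ ?_
    · simp only
      rw [h1, PySem.List.slice_to_natCast, cbTake_spec]
    · simp only
      omega
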